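-- pv_equiv track=rewrite | github.com/Trolky/PRO | sequence.py | is_sum_sequence_o_n_2
-- ===== SOURCE A (Python) =====
-- def is_sum_sequence_o_n_2(arr):
--     if len(arr) < 2 or arr[0] != 1:
--         return False
--
--     possible_sums = set()
--
--     possible_sums.add(arr[0] + arr[0])
--
--     for i in range(1, len(arr)):
--         if arr[i] not in possible_sums:
--             return False
--
--         for j in range(i + 1):
--             possible_sums.add(arr[j] + arr[i])
--
--     return True
-- ===== SOURCE B (Python) =====
-- def is_sum_sequence_o_n_2(arr):
--     if len(arr) < 2 or arr[0] != 1: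
--         return False
--     prefix = {arr[0]}
--     for i in range(1, len(arr)):
--         target = arr[i]
--         if not any((target - x) in prefix for x in prefix):
--             return False
--         prefix.add(target)
--     return True
-- ===== Notes on version B (the rewrite author's own statement) =====
-- stated objective: alternative
-- what changed: B keeps only the set of prefix ELEMENTS and answers each step by a two-sum complement query (is target-x in the prefix set for some x), instead of A's accumulated set of all pairwise sums populated by a nested insertion loop.
import Mathlib
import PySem

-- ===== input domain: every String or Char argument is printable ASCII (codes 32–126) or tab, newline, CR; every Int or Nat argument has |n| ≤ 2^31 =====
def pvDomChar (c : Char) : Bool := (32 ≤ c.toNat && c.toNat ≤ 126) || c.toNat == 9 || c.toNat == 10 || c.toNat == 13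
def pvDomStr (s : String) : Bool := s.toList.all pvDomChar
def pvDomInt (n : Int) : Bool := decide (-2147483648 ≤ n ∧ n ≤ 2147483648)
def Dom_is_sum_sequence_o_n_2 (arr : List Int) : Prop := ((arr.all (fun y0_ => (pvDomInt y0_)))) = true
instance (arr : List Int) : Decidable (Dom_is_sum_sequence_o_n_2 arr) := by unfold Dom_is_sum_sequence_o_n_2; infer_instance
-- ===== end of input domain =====

-- B replaces A's accumulated set of all pairwise sums (nested insertion loop) by the set of
-- prefix elements with a per-step two-sum complement query; same return value on every input.

-- ===== PORT A =====
-- inner loop: for j in range(i + 1): possible_sums.add(arr[j] + arr[i])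
def pvAInner (arr : List Int) (i : Nat) (s : PySem.Set Int) : PySem.Set Int :=
  (List.range (i + 1)).foldl (fun s' j => PySem.Set.add s' (arr.getD j 0 + arr.getD i 0)) s

-- outer loop: for i in range(1, len(arr)): ... (early return False modelled by the recursion)
def pvALoop (arr : List Int) (i : Nat) (s : PySem.Set Int) : Bool :=
  if _h : i < arr.length then
    if PySem.Set.contains s (arr.getD i 0) then
      pvALoop arr (i + 1) (pvAInner arr i s)
    else false
  else true
termination_by arr.length - i

def is_sum_sequence_o_n_2 (arr : List Int) : Bool :=
  if arr.length < 2 ∨ arr.getD 0 0 ≠ 1 then false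
  else pvALoop arr 1 (PySem.Set.add PySem.Set.empty (arr.getD 0 0 + arr.getD 0 0))

-- ===== PORT B =====
-- loop: if not any((target - x) in prefix for x in prefix): return False; prefix.add(target)
def pvBLoop (arr : List Int) (i : Nat) (p : PySem.Set Int) : Bool :=
  if _h : i < arr.length then
    let target := arr.getD i 0
    if p.any (fun x => PySem.Set.contains p (target - x)) then
      pvBLoop arr (i + 1) (PySem.Set.add p target)
    else false
  else true
termination_by arr.length - i

def is_sum_sequence_o_n_2_alt (arr : List Int) : Bool :=
  if arr.length < 2 ∨ arr.getD 0 0 ≠ 1 then false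
  else pvBLoop arr 1 (PySem.Set.ofList [arr.getD 0 0])

-- ===== PRECONDITION & SPEC =====
def Spec_is_sum_sequence_o_n_2 (arr : List Int) (out : Bool) : Prop := out = is_sum_sequence_o_n_2_alt arr
instance (arr : List Int) (out : Bool) : Decidable (Spec_is_sum_sequence_o_n_2 arr out) := by unfold Spec_is_sum_sequence_o_n_2; infer_instance

-- ===== CLAIM (what is proved, stated in full; the proofs are below) =====
def Claim_equal_is_sum_sequence_o_n_2 : Prop := ∀ (arr : List Int), Dom_is_sum_sequence_o_n_2 arr → Spec_is_sum_sequence_o_n_2 arr (is_sum_sequence_o_n_2 arr)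

-- ===== LEMMAS AND PROOFS =====

-- joint invariant: s holds exactly the pairwise sums arr[j]+arr[k] (j ≤ k < i) and p exactly
-- the prefix elements arr[j] (j < i); then the two loops return the same Bool.
theorem pvLoop_eq (arr : List Int) (i : Nat) (s p : PySem.Set Int)
    (hs : ∀ v, v ∈ s ↔ ∃ j k, j ≤ k ∧ k < i ∧ arr.getD j 0 + arr.getD k 0 = v)
    (hp : ∀ x, x ∈ p ↔ ∃ j, j < i ∧ arr.getD j 0 = x) :
    pvALoop arr i s = pvBLoop arr i p := by
  by_cases h : i < arr.length
  · rw [pvALoop, pvBLoop]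
    simp only [h, dif_pos]
    have hcheck : PySem.Set.contains s (arr.getD i 0)
        = p.any (fun x => PySem.Set.contains p (arr.getD i 0 - x)) := by
      by_cases hc : ∃ j k, j < i ∧ k < i ∧ arr.getD j 0 + arr.getD k 0 = arr.getD i 0
      · obtain ⟨j, k, hj, hk, hsum⟩ := hc
        have hA : PySem.Set.contains s (arr.getD i 0) = true := by
          rw [PySem.Set.contains_iff, hs]
          rcases le_total j k with hjk | hkj
          · exact ⟨j, k, hjk, hk, hsum⟩
          · exact ⟨k, j, hkj, hj, by omega⟩
        have hB : p.any (fun x => PySem.Set.contains p (arr.getD i 0 - x)) = true := by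
          rw [List.any_eq_true]
          refine ⟨arr.getD j 0, (hp _).2 ⟨j, hj, rfl⟩, ?_⟩
          rw [PySem.Set.contains_iff, hp]
          exact ⟨k, hk, by omega⟩
        rw [hA, hB]
      · have hA : PySem.Set.contains s (arr.getD i 0) = false := by
          rw [Bool.eq_false_iff]
          intro hmem
          rw [PySem.Set.contains_iff, hs] at hmem
          obtain ⟨j, k, hjk, hk, hsum⟩ := hmem
          exact hc ⟨j, k, by omega, hk, hsum⟩
        have hB : p.any (fun x => PySem.Set.contains p (arr.getD i 0 - x)) = false := by
          rw [Bool.eq_false_iff]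
          intro hmem
          rw [List.any_eq_true] at hmem
          obtain ⟨x, hx, hcx⟩ := hmem
          rw [PySem.Set.contains_iff, hp] at hcx
          obtain ⟨k, hk, hek⟩ := hcx
          obtain ⟨j, hj, hej⟩ := (hp x).1 hx
          exact hc ⟨j, k, hj, hk, by omega⟩
        rw [hA, hB]
    rw [hcheck]
    by_cases hb : p.any (fun x => PySem.Set.contains p (arr.getD i 0 - x)) = true
    · simp only [hb, if_pos]
      apply pvLoop_eq
      · intro v
        unfold pvAInner
        rw [PySem.Set.mem_foldl_add]
        constructor
        · rintro (hv | ⟨j, hjmem, rfl⟩)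
          · obtain ⟨j, k, hjk, hk, hsum⟩ := (hs v).1 hv
            exact ⟨j, k, hjk, by omega, hsum⟩
          · rw [List.mem_range] at hjmem
            exact ⟨j, i, by omega, by omega, rfl⟩
        · rintro ⟨j, k, hjk, hk, hsum⟩
          by_cases hki : k < i
          · exact Or.inl ((hs v).2 ⟨j, k, hjk, hki, hsum⟩)
          · have : k = i := by omega
            subst this
            exact Or.inr ⟨j, List.mem_range.2 (by omega), hsum.symm⟩
      · intro x
        rw [PySem.Set.mem_add]
        constructor
        · rintro (hx | rfl)
          · obtain ⟨j, hj, he⟩ := (hp x).1 hx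
            exact ⟨j, by omega, he⟩
          · exact ⟨i, by omega, rfl⟩
        · rintro ⟨j, hj, he⟩
          by_cases hji : j < i
          · exact Or.inl ((hp x).2 ⟨j, hji, he⟩)
          · have : j = i := by omega
            subst this
            exact Or.inr he.symm
    · have hb' : (p.any fun x => PySem.Set.contains p (arr.getD i 0 - x)) = false := by
        simpa using hb
      rw [hb']
      simp
  · rw [pvALoop, pvBLoop]
    simp [h]
termination_by arr.length - i

-- ===== VERDICT (by name: the statement is the Claim_ definition above) =====
theorem is_sum_sequence_o_n_2_spec : Claim_equal_is_sum_sequence_o_n_2 := by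
  intro arr _hdom
  unfold Spec_is_sum_sequence_o_n_2 is_sum_sequence_o_n_2 is_sum_sequence_o_n_2_alt
  by_cases hg : arr.length < 2 ∨ arr.getD 0 0 ≠ 1
  · rw [if_pos hg, if_pos hg]
  · rw [if_neg hg, if_neg hg]
    apply pvLoop_eq
    · intro v
      constructor
      · intro hv
        rw [PySem.Set.mem_add] at hv
        rcases hv with hv | rfl
        · simp [PySem.Set.empty] at hv
        · exact ⟨0, 0, le_rfl, by omega, rfl⟩
      · rintro ⟨j, k, hjk, hk, hsum⟩
        have hj0 : j = 0 := by omega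
        have hk0 : k = 0 := by omega
        subst hj0; subst hk0
        rw [PySem.Set.mem_add]
        exact Or.inr hsum.symm
    · intro x
      rw [PySem.Set.mem_ofList, List.mem_singleton]
      constructor
      · rintro rfl; exact ⟨0, by omega, rfl⟩
      · rintro ⟨j, hj, he⟩
        have : j = 0 := by omega
        subst this; exact he.symm
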